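-- pv_equiv track=rewrite | github.com/Gohu2000/synthese_MBA | bitvector_network/bitvector_tools.py | seed_to_instance
-- ===== SOURCE A (Python) =====
-- def int_to_binary(n, size):
--     assert 0 <= n < 2**size
--     if n == 0:
--         return [0 for i in range(size)]
--     q, r = divmod(n, 2)
--     return [r] + int_to_binary(q, size-1)
--
-- def seed_to_instance(nb_bits, seed):
--     l_seed = seed.split()
--     instance = []
--     for subseed in l_seed:
--         l_subseed = subseed.split(":")
--         input = []
--         for n in l_subseed[:-1]:
--             input.append(int_to_binary(int(n), nb_bits))
--         y = int_to_binary(int(l_subseed[-1]), nb_bits)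
--         instance.append((input, y))
--     return instance
-- ===== SOURCE B (Python) =====
-- def int_to_binary(n, size):
--     assert 0 <= n < 2**size
--     return [(n >> i) & 1 for i in range(size)]
--
-- def seed_to_instance(nb_bits, seed):
--     return [([int_to_binary(int(t), nb_bits) for t in parts[:-1]],
--              int_to_binary(int(parts[-1]), nb_bits))
--             for parts in (s.split(":") for s in seed.split())]
-- ===== Notes on version B (the rewrite author's own statement) =====
-- stated objective: simpler
-- what changed: int_to_binary's recursive divmod construction ([r] + recurse on n//2) is replaced by a closed-form bit-extraction comprehension [(n >> i) & 1 for i in range(size)], and the outer accumulator loops become a single nested comprehension.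
import Mathlib
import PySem

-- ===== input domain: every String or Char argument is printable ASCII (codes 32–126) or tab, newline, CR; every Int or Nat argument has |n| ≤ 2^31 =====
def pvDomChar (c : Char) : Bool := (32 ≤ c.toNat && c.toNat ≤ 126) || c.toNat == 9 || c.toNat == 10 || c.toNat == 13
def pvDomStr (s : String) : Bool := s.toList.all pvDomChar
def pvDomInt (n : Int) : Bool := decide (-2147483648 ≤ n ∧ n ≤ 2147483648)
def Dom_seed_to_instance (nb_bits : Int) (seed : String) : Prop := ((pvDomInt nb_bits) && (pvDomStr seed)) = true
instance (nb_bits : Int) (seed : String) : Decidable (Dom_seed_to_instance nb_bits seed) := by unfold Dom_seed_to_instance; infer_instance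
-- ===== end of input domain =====

-- B replaces A's recursive divmod helper by a closed-form bit-extraction comprehension ((n >> i) & 1); return-value equivalence on Pre_ (neither version mutates its arguments).

-- ===== PORT A =====
-- int_to_binary, recursive.  Guard `n ≤ 0` instead of `n == 0`: for n < 0 Python recurses
-- forever (the assert having already failed and raised, such n is outside Pre_).
def intToBinaryA (n : Int) (size : Int) : List Int :=
  if n ≤ 0 then (PySem.List.pyRange 0 size 1).map (fun _ => 0)
  else PySem.Int.mod n 2 :: intToBinaryA (PySem.Int.floordiv n 2) (size - 1)
termination_by n.toNat
decreasing_by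
  rename_i h
  rw [PySem.Int.floordiv_eq_ediv_of_pos (by omega : (0:Int) < 2)]
  omega

-- the `.getD`s only paper over cases Python raises in (ValueError / IndexError), excluded by Pre_
def seed_to_instance (nb_bits : Int) (seed : String) : List (List (List Int) × List Int) :=
  (PySem.Str.split₀ seed).foldl (fun inst subseed =>
    let l_subseed := (PySem.Str.split? subseed ":").getD []
    let input := (PySem.List.slice l_subseed none (some (-1))).foldl
      (fun input n => input ++ [intToBinaryA ((PySem.Int.ofStr? n).getD 0) nb_bits]) []
    let y := intToBinaryA ((PySem.Int.ofStr? ((PySem.List.pyGet? l_subseed (-1)).getD "")).getD 0) nb_bits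
    inst ++ [(input, y)]) []

-- ===== PORT B =====
-- [(n >> i) & 1 for i in range(size)]; Python's `>>` on int is Lean's `>>>` (i from range(size) is ≥ 0)
def intToBinaryB (n : Int) (size : Int) : List Int :=
  (PySem.List.pyRange 0 size 1).map (fun i => PySem.Int.band (n >>> i.toNat) 1)

def seed_to_instance_alt (nb_bits : Int) (seed : String) : List (List (List Int) × List Int) :=
  ((PySem.Str.split₀ seed).map (fun s => (PySem.Str.split? s ":").getD [])).map
    (fun parts =>
      ((PySem.List.slice parts none (some (-1))).map
         (fun t => intToBinaryB ((PySem.Int.ofStr? t).getD 0) nb_bits),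
       intToBinaryB ((PySem.Int.ofStr? ((PySem.List.pyGet? parts (-1)).getD "")).getD 0) nb_bits))

-- ===== PRECONDITION & SPEC =====
-- Pre_ = exactly the inputs where A returns: every whitespace-word's ':'-field parses as a
-- Python int v with `assert 0 <= v < 2**nb_bits` passing.  For nb_bits < 0 Python computes
-- 2**nb_bits as a FLOAT: positive (so only v = 0 passes) down to nb_bits = -1074, then it
-- underflows to 0.0 and the assert always raises; pvTokOK mirrors that exactly.
-- v < 2^nb_bits is stated via bitLength so the instance computes for huge nb_bits.
def pvTokOK (nb_bits : Int) (t : String) : Bool :=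
  match PySem.Int.ofStr? t with
  | some v => if 0 ≤ nb_bits then decide (0 ≤ v ∧ (PySem.Int.bitLength v : Int) ≤ nb_bits)
              else decide (v = 0 ∧ -1074 ≤ nb_bits)
  | none => false

def Pre_seed_to_instance (nb_bits : Int) (seed : String) : Prop :=
  ∀ sub ∈ PySem.Str.split₀ seed, ∀ t ∈ (PySem.Str.split? sub ":").getD [],
    pvTokOK nb_bits t = true
instance (nb_bits : Int) (seed : String) : Decidable (Pre_seed_to_instance nb_bits seed) := by
  unfold Pre_seed_to_instance; infer_instance

def pvWitness_seed_to_instance : Int × String := (3, "5:2 7")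

def Spec_seed_to_instance (nb_bits : Int) (seed : String) (out : List (List (List Int) × List Int)) : Prop := out = seed_to_instance_alt nb_bits seed
instance (nb_bits : Int) (seed : String) (out : List (List (List Int) × List Int)) : Decidable (Spec_seed_to_instance nb_bits seed out) := by unfold Spec_seed_to_instance; infer_instance

-- ===== CLAIM (what is proved, stated in full; the proofs are below) =====
def Claim_equal_seed_to_instance : Prop := ∀ (nb_bits : Int) (seed : String), Dom_seed_to_instance nb_bits seed → Pre_seed_to_instance nb_bits seed → Spec_seed_to_instance nb_bits seed (seed_to_instance nb_bits seed)

-- ===== LEMMAS AND PROOFS =====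

-- proof-only helper: the closed-form bit of n at position k (what B computes per index)
def bitf (n : Int) (k : Nat) : Int := PySem.Int.band (n >>> k) 1

lemma shiftR_nonneg (n : Int) (hn : 0 ≤ n) (k : Nat) :
    n >>> k = PySem.Int.floordiv n (2 ^ k) := by
  obtain ⟨m, rfl⟩ := Int.eq_ofNat_of_zero_le hn
  have h1 : (m : Int) >>> k = ((m >>> k : Nat) : Int) := by simp
  have h2 : ((2:Int) ^ k) = ((2 ^ k : Nat) : Int) := by push_cast; ring
  rw [h1, h2, PySem.Int.floordiv_natCast, Nat.shiftRight_eq_div_pow]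

lemma shiftR_succ (n : Int) (hn : 0 ≤ n) (k : Nat) :
    n >>> (k + 1) = (PySem.Int.floordiv n 2) >>> k := by
  have hd : 0 ≤ PySem.Int.floordiv n 2 := by
    rw [PySem.Int.floordiv_eq_ediv_of_pos (by omega : (0:Int) < 2)]; omega
  rw [shiftR_nonneg n hn, shiftR_nonneg _ hd]
  have h : ((2:Int) ^ (k+1)) = 2 * 2 ^ k := by ring
  rw [h, show PySem.Int.floordiv = Int.fdiv from rfl]
  exact (Int.fdiv_fdiv_eq_fdiv_mul n (by omega) (by positivity)).symm

lemma A_range (s : Nat) : ∀ n : Int, 0 ≤ n → n < 2 ^ s →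
    intToBinaryA n (s : Int) = (List.range s).map (bitf n) := by
  induction s with
  | zero =>
    intro n h0 h1
    have : n = 0 := by omega
    subst this
    rw [intToBinaryA]
    simp [PySem.List.pyRange_one_eq_nil]
  | succ s ih =>
    intro n h0 h1
    rw [intToBinaryA]
    by_cases hn : n ≤ 0
    · have : n = 0 := by omega
      subst this
      simp only [if_pos le_rfl]
      rw [PySem.List.pyRange_one]
      apply List.ext_getElem (by simp) ?_
      intro i hi1 hi2
      simp [bitf]
      decide
    · rw [if_neg hn]
      have hpos : 0 < n := by omega
      have hd0 : 0 ≤ PySem.Int.floordiv n 2 := by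
        rw [PySem.Int.floordiv_eq_ediv_of_pos (by omega : (0:Int) < 2)]; omega
      have hdlt : PySem.Int.floordiv n 2 < 2 ^ s := by
        rw [PySem.Int.floordiv_eq_ediv_of_pos (by omega : (0:Int) < 2)]
        have h2 : n < 2 * 2 ^ s := by rw [← pow_succ']; exact_mod_cast h1
        omega
      have hcast : ((s + 1 : Nat) : Int) - 1 = (s : Int) := by push_cast; ring
      rw [hcast, ih _ hd0 hdlt]
      rw [List.range_succ_eq_map, List.map_cons, List.map_map]
      congr 1
      · simp [bitf, PySem.Int.band_one]
      · apply List.map_congr_left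
        intro k _
        simp only [Function.comp, bitf, Nat.succ_eq_add_one]
        rw [shiftR_succ n (le_of_lt hpos) k]

lemma B_range (n : Int) (s : Nat) :
    intToBinaryB n (s : Int) = (List.range s).map (bitf n) := by
  unfold intToBinaryB
  rw [PySem.List.pyRange_one, List.map_map]
  apply List.map_congr_left
  intro k _
  simp [bitf, Int.shiftRight_natCast_right]

-- the two helpers agree whenever the Python assert passes
lemma intToBinary_eq (nb n : Int) (hn : 0 ≤ n)
    (hpos : 0 ≤ nb → n < 2 ^ nb.toNat) (hneg : nb < 0 → n = 0) :
    intToBinaryA n nb = intToBinaryB n nb := by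
  by_cases h : 0 ≤ nb
  · have hs : nb = (nb.toNat : Int) := (Int.toNat_of_nonneg h).symm
    rw [hs, A_range _ n hn (hpos h), B_range]
  · have hz : n = 0 := hneg (by omega)
    subst hz
    rw [intToBinaryA, if_pos le_rfl]
    unfold intToBinaryB
    rw [PySem.List.pyRange_one_eq_nil (by omega), List.map_nil, List.map_nil]

lemma tok_eq (nb : Int) (t : String) (h : pvTokOK nb t = true) :
    intToBinaryA ((PySem.Int.ofStr? t).getD 0) nb = intToBinaryB ((PySem.Int.ofStr? t).getD 0) nb := by
  unfold pvTokOK at h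
  cases heq : PySem.Int.ofStr? t with
  | none => rw [heq] at h; simp at h
  | some v =>
    rw [heq] at h
    have h' : (if 0 ≤ nb then decide (0 ≤ v ∧ (PySem.Int.bitLength v : Int) ≤ nb)
               else decide (v = 0 ∧ -1074 ≤ nb)) = true := h
    clear h
    simp only [Option.getD_some]
    by_cases hnb : 0 ≤ nb
    · rw [if_pos hnb] at h'
      have hv := of_decide_eq_true h'
      refine intToBinary_eq nb v hv.1 (fun _ => ?_) (fun hlt => absurd hnb (by omega))
      have h1 : v.natAbs < 2 ^ PySem.Int.bitLength v := PySem.Int.lt_two_pow_bitLength v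
      have h2 : PySem.Int.bitLength v ≤ nb.toNat := by omega
      have h3 : v.natAbs < 2 ^ nb.toNat :=
        lt_of_lt_of_le h1 (Nat.pow_le_pow_right (by omega) h2)
      have h4 : v = (v.natAbs : Int) := by omega
      rw [h4]
      exact_mod_cast h3
    · rw [if_neg hnb] at h'
      have hv := of_decide_eq_true h'
      exact intToBinary_eq nb v (by omega) (fun h' => absurd h' hnb) (fun _ => hv.1)

lemma y_eq (nb : Int) (parts : List String) (h : ∀ t ∈ parts, pvTokOK nb t = true) :
    intToBinaryA ((PySem.Int.ofStr? ((PySem.List.pyGet? parts (-1)).getD "")).getD 0) nb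
      = intToBinaryB ((PySem.Int.ofStr? ((PySem.List.pyGet? parts (-1)).getD "")).getD 0) nb := by
  cases hg : PySem.List.pyGet? parts (-1) with
  | some t =>
    simp only [Option.getD_some]
    exact tok_eq nb t (h t (PySem.List.mem_of_pyGet?_eq_some _ hg))
  | none =>
    simp only [Option.getD_none]
    have : PySem.Int.ofStr? "" = none := by decide
    rw [this]
    simp only [Option.getD_none]
    refine intToBinary_eq nb 0 le_rfl (fun _ => ?_) (fun _ => rfl)
    positivity

lemma foldl_push {α β : Type} (f : α → β) : ∀ (xs : List α) (acc : List β),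
    xs.foldl (fun a x => a ++ [f x]) acc = acc ++ xs.map f := by
  intro xs
  induction xs with
  | nil => simp
  | cons x xs ih => intro acc; simp [ih]

-- ===== VERDICT (by name: the statement is the Claim_ definition above) =====
theorem seed_to_instance_spec : Claim_equal_seed_to_instance := by
  intro nb seed _ hpre
  unfold Spec_seed_to_instance seed_to_instance seed_to_instance_alt
  rw [foldl_push, List.map_map, List.nil_append]
  refine List.map_congr_left ?_
  intro sub hsub
  have hgood : ∀ t ∈ (PySem.Str.split? sub ":").getD [], pvTokOK nb t = true :=
    hpre sub hsub
  simp only [Function.comp]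
  rw [foldl_push, List.nil_append]
  refine Prod.ext ?_ ?_
  · refine List.map_congr_left ?_
    intro t ht
    exact tok_eq nb t (hgood t (List.mem_of_mem_dropLast (by
      rwa [← PySem.List.slice_to_neg_one])))
  · exact y_eq nb _ hgood
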